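-- pv_equiv track=rewrite | github.com/getsentry/sentry | src/sentry_sdk_alpha/utils.py | get_sdk_name
-- ===== SOURCE A (Python) =====
-- def get_sdk_name(installed_integrations):
--     # type: (List[str]) -> str
--     """Return the SDK name including the name of the used web framework."""
--
--     # Note: I can not use for example sentry_sdk.integrations.django.DjangoIntegration.identifier
--     # here because if django is not installed the integration is not accessible.
--     framework_integrations = [
--         "django",
--         "flask",
--         "fastapi",
--         "bottle",
--         "falcon",
--         "quart",
--         "sanic",
--         "starlette",
--         "litestar",
--         "starlite",
--         "chalice",
--         "serverless",
--         "pyramid",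
--         "tornado",
--         "aiohttp",
--         "aws_lambda",
--         "gcp",
--         "beam",
--         "asgi",
--         "wsgi",
--     ]
--
--     for integration in framework_integrations:
--         if integration in installed_integrations:
--             return "sentry.python.{}".format(integration)
--
--     return "sentry.python"
-- ===== SOURCE B (Python) =====
-- def get_sdk_name(installed_integrations):
--     # type: (List[str]) -> str
--     """Return the SDK name including the name of the used web framework."""
--     priority = {
--         name: index
--         for index, name in enumerate(
--             "django flask fastapi bottle falcon quart sanic starlette "
--             "litestar starlite chalice serverless pyramid tornado aiohttp "
--             "aws_lambda gcp beam asgi wsgi".split()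
--         )
--     }
--
--     best = None  # (priority index, framework name)
--     for integration in installed_integrations:
--         index = priority.get(integration)
--         if index is not None and (best is None or index < best[0]):
--             best = (index, integration)
--
--     if best is None:
--         return "sentry.python"
--     return "sentry.python.{}".format(best[1])
-- ===== Notes on version B (the rewrite author's own statement) =====
-- stated objective: faster
-- what changed: A scans the fixed 20-name priority list testing each name for membership in the input (20 list scans); B builds a name-to-priority-index dict once and makes a single pass over the input keeping the entry with the minimum index.
import Mathlib
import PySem

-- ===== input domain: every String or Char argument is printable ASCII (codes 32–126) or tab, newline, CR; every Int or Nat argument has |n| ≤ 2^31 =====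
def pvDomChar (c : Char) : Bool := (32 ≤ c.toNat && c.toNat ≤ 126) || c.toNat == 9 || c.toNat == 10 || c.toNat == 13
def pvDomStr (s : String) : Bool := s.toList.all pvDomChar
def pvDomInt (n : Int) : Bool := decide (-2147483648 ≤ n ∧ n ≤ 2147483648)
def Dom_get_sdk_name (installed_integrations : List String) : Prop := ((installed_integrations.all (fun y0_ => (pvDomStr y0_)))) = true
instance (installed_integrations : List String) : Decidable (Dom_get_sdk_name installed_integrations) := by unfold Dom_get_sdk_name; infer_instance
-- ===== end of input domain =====

-- B replaces A's scan of the 20-name priority list (a list-membership test per name) by a single pass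
-- over the input that tracks the minimum priority index via a name→index lookup table (objective: faster, measured).

-- the priority-ordered framework list, the identical literal in both Pythons
def pvFrameworks : List String :=
  ["django", "flask", "fastapi", "bottle", "falcon", "quart", "sanic", "starlette",
   "litestar", "starlite", "chalice", "serverless", "pyramid", "tornado", "aiohttp",
   "aws_lambda", "gcp", "beam", "asgi", "wsgi"]

-- ===== PORT A =====
-- A's for-loop with early return: structural recursion over the framework list
def pvLoopA : List String → List String → String
  | [], _ => "sentry.python"
  | f :: rest, installed =>
      if installed.contains f then "sentry.python." ++ f else pvLoopA rest installed

def get_sdk_name (installed_integrations : List String) : String :=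
  pvLoopA pvFrameworks installed_integrations

-- ===== PORT B =====
-- the whitespace-joined framework names Source B splits apart
def pvNamesB : List String :=
  PySem.Str.split₀ ("django flask fastapi bottle falcon quart sanic starlette " ++
    "litestar starlite chalice serverless pyramid tornado aiohttp " ++
    "aws_lambda gcp beam asgi wsgi")

-- {name: index for index, name in enumerate(... .split())}
def pvPriority : PySem.Dict String Int :=
  PySem.Dict.ofList ((PySem.List.enumerate pvNamesB 0).map (fun p => (p.2, p.1)))

-- B's loop body: keep the (index, name) pair with the smallest priority index
def pvStepB (best : Option (Int × String)) (integration : String) : Option (Int × String) :=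
  match pvPriority.get? integration with
  | none => best
  | some index =>
      match best with
      | none => some (index, integration)
      | some (j, _) => if index < j then some (index, integration) else best

def get_sdk_name_alt (installed_integrations : List String) : String :=
  match installed_integrations.foldl pvStepB none with
  | none => "sentry.python"
  | some (_, name) => "sentry.python." ++ name

-- ===== PRECONDITION & SPEC =====
def Spec_get_sdk_name (installed_integrations : List String) (out : String) : Prop := out = get_sdk_name_alt installed_integrations
instance (installed_integrations : List String) (out : String) : Decidable (Spec_get_sdk_name installed_integrations out) := by unfold Spec_get_sdk_name; infer_instance

-- ===== CLAIM (what is proved, stated in full; the proofs are below) =====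
def Claim_equal_get_sdk_name : Prop := ∀ (installed_integrations : List String), Dom_get_sdk_name installed_integrations → Spec_get_sdk_name installed_integrations (get_sdk_name installed_integrations)

-- ===== LEMMAS AND PROOFS =====

def rankAux : List String → Int → String → Option Int
  | [], _, _ => none
  | f :: rest, k, s => if f == s then some k else rankAux rest (k + 1) s

def rank (s : String) : Option Int := rankAux pvFrameworks 0 s

set_option maxRecDepth 8192 in
lemma priority_get (s : String) : pvPriority.get? s = rank s := by
  rw [show pvPriority = PySem.Dict.mk [("django",0),("flask",1),("fastapi",2),("bottle",3),("falcon",4),("quart",5),("sanic",6),("starlette",7),("litestar",8),("starlite",9),("chalice",10),("serverless",11),("pyramid",12),("tornado",13),("aiohttp",14),("aws_lambda",15),("gcp",16),("beam",17),("asgi",18),("wsgi",19)] from by decide]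
  simp only [PySem.Dict.get?_mk_cons, rank, pvFrameworks, rankAux,
    show (PySem.Dict.mk ([]:List (String×Int))).get? s = none from rfl]
  norm_num

lemma rankAux_spec (fs : List String) (k : Int) (s : String) (i : Int)
    (h : rankAux fs k s = some i) :
    k ≤ i ∧ i < k + fs.length ∧ fs[(i - k).toNat]? = some s := by
  induction fs generalizing k with
  | nil => simp [rankAux] at h
  | cons f rest ih =>
    simp only [rankAux] at h
    by_cases hf : (f == s) = true
    · simp [hf] at h
      subst h
      simp_all
    · simp [hf] at h
      obtain ⟨h1, h2, h3⟩ := ih (k + 1) h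
      refine ⟨by omega, by simp; omega, ?_⟩
      have : (i - k).toNat = (i - (k + 1)).toNat + 1 := by omega
      simp [this, h3]

lemma rankAux_first (fs : List String) (k : Int) (j : Nat) (s : String)
    (hnd : fs.Nodup) (hs : fs[j]? = some s) :
    rankAux fs k s = some (k + j) := by
  induction fs generalizing k j with
  | nil => simp at hs
  | cons f rest ih =>
    cases j with
    | zero =>
      simp at hs
      subst hs
      simp [rankAux]
    | succ j' =>
      simp at hs
      have hmem : s ∈ rest := List.mem_of_getElem? hs
      have hne : (f == s) = false := by
        simp only [List.nodup_cons] at hnd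
        simp only [beq_eq_false_iff_ne, ne_eq]
        intro hfs; exact hnd.1 (hfs ▸ hmem)
      simp only [rankAux, hne, Bool.false_eq_true, if_false]
      rw [ih (k + 1) j' (List.nodup_cons.mp hnd).2 hs]
      have h2 : k + 1 + (j' : Int) = k + ((j' + 1 : Nat) : Int) := by push_cast; ring
      rw [h2]

lemma rank_spec (s : String) (i : Int) (h : rank s = some i) :
    0 ≤ i ∧ i < 20 ∧ pvFrameworks[i.toNat]? = some s := by
  obtain ⟨a, b, c⟩ := rankAux_spec pvFrameworks 0 s i (by simpa [rank] using h)
  have h20 : (pvFrameworks.length : Int) = 20 := by decide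
  exact ⟨a, by omega, by simpa using c⟩

lemma rank_first (j : Nat) (s : String) (hs : pvFrameworks[j]? = some s) :
    rank s = some (j : Int) := by
  have := rankAux_first pvFrameworks 0 j s (by decide) hs
  simpa [rank] using this


-- index-level view of B's loop
def fmin (a : Option Int) (x : String) : Option Int :=
  match rank x with
  | none => a
  | some i => match a with
    | none => some i
    | some j => some (min i j)

def minIdx (xs : List String) : Option Int := xs.foldl fmin none

def Good (acc : Option (Int × String)) : Prop :=
  ∀ i s, acc = some (i, s) → 0 ≤ i ∧ i < 20 ∧ pvFrameworks[i.toNat]? = some s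

lemma step_idx (acc : Option (Int × String)) (x : String) :
    (pvStepB acc x).map Prod.fst = fmin (acc.map Prod.fst) x := by
  unfold pvStepB fmin
  rw [priority_get]
  cases hr : rank x with
  | none => cases acc <;> simp
  | some i =>
    cases acc with
    | none => simp
    | some p =>
      obtain ⟨j, s⟩ := p
      by_cases hij : i < j <;> simp [hij, min_def] <;> omega

lemma step_good (acc : Option (Int × String)) (x : String) (h : Good acc) :
    Good (pvStepB acc x) := by
  unfold pvStepB
  rw [priority_get]
  cases hr : rank x with
  | none => exact h
  | some i =>
    have hi := rank_spec x i hr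
    cases acc with
    | none =>
      intro i' s' he
      simp at he
      obtain ⟨rfl, rfl⟩ := he
      exact hi
    | some p =>
      obtain ⟨j, s⟩ := p
      by_cases hij : i < j <;> simp [hij]
      · intro i' s' he
        simp at he
        obtain ⟨rfl, rfl⟩ := he
        exact hi
      · exact h

set_option maxRecDepth 8192 in
lemma fold_good (xs : List String) (acc : Option (Int × String)) (h : Good acc) :
    Good (xs.foldl pvStepB acc) := by
  induction xs generalizing acc with
  | nil => exact h
  | cons x xs ih => exact ih _ (step_good acc x h)

lemma fold_idx (xs : List String) (acc : Option (Int × String)) :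
    (xs.foldl pvStepB acc).map Prod.fst = xs.foldl fmin (acc.map Prod.fst) := by
  induction xs generalizing acc with
  | nil => rfl
  | cons x xs ih => rw [List.foldl_cons, List.foldl_cons, ih, step_idx]

-- minIdx = none iff no element has a rank
lemma foldl_fmin_none (xs : List String) (a : Option Int) :
    xs.foldl fmin a = none ↔ a = none ∧ ∀ x ∈ xs, rank x = none := by
  induction xs generalizing a with
  | nil => simp
  | cons x xs ih =>
    rw [List.foldl_cons, ih]
    constructor
    · rintro ⟨h1, h2⟩
      unfold fmin at h1
      cases hr : rank x with
      | none => simp [hr] at h1; exact ⟨h1, by simpa [hr] using h2⟩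
      | some i => rw [hr] at h1; cases a <;> simp at h1
    · rintro ⟨h1, h2⟩
      have hx : rank x = none := h2 x (by simp)
      refine ⟨?_, fun y hy => h2 y (by simp [hy])⟩
      simp [fmin, hx, h1]

-- minIdx = some i: i is attained and minimal
lemma foldl_fmin_some (xs : List String) (a : Option Int) (i : Int)
    (h : xs.foldl fmin a = some i) :
    (a = some i ∨ ∃ x ∈ xs, rank x = some i) ∧
    (∀ x ∈ xs, ∀ k, rank x = some k → i ≤ k) ∧
    (∀ j, a = some j → i ≤ j) := by
  induction xs generalizing a with
  | nil =>
    simp at h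
    exact ⟨Or.inl h, by simp, fun j hj => by rw [h] at hj; simp at hj; omega⟩
  | cons x xs ih =>
    rw [List.foldl_cons] at h
    obtain ⟨ha, hmin, hlb⟩ := ih (fmin a x) h
    cases hr : rank x with
    | none =>
      have hfa : fmin a x = a := by simp [fmin, hr]
      rw [hfa] at ha hlb
      refine ⟨?_, ?_, hlb⟩
      · rcases ha with h' | ⟨y, hy, hry⟩
        · exact Or.inl h'
        · exact Or.inr ⟨y, by simp [hy], hry⟩
      · intro y hy k hk
        rcases List.mem_cons.mp hy with rfl | hy'
        · rw [hr] at hk; cases hk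
        · exact hmin y hy' k hk
    | some v =>
      cases a with
      | none =>
        have hfa : fmin none x = some v := by simp [fmin, hr]
        rw [hfa] at ha hlb
        have hiv : i ≤ v := hlb v rfl
        refine ⟨?_, ?_, by simp⟩
        · rcases ha with h' | ⟨y, hy, hry⟩
          · exact Or.inr ⟨x, by simp, by rw [hr, ← h']⟩
          · exact Or.inr ⟨y, by simp [hy], hry⟩
        · intro y hy k hk
          rcases List.mem_cons.mp hy with rfl | hy'
          · rw [hr] at hk; injection hk with hk'; omega
          · exact hmin y hy' k hk
      | some j =>
        have hfa : fmin (some j) x = some (min v j) := by simp [fmin, hr]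
        rw [hfa] at ha hlb
        have hmv : i ≤ min v j := hlb (min v j) rfl
        refine ⟨?_, ?_, ?_⟩
        · rcases ha with h' | ⟨y, hy, hry⟩
          · injection h' with h'
            rcases le_total v j with hvj | hvj
            · exact Or.inr ⟨x, by simp, by rw [hr]; congr 1; omega⟩
            · exact Or.inl (by congr 1; omega)
          · exact Or.inr ⟨y, by simp [hy], hry⟩
        · intro y hy k hk
          rcases List.mem_cons.mp hy with rfl | hy'
          · rw [hr] at hk; injection hk with hk'; omega
          · exact hmin y hy' k hk
        · intro j' hj'; injection hj' with hj'; omega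


lemma pvLoopA_find' (fs xs : List String) :
    pvLoopA fs xs =
      match fs.find? (fun f => xs.contains f) with
      | some f => "sentry.python." ++ f
      | none => "sentry.python" := by
  induction fs with
  | nil => rfl
  | cons f rest ih =>
    cases h : xs.contains f <;> simp only [pvLoopA, List.find?_cons, h, ih] <;> simp

lemma pv_main (xs : List String) : get_sdk_name xs = get_sdk_name_alt xs := by
  unfold get_sdk_name get_sdk_name_alt
  rw [pvLoopA_find']
  have hg : Good (xs.foldl pvStepB none) := fold_good xs none (by intro i s h; cases h)
  have hidx := fold_idx xs none
  simp only [Option.map_none] at hidx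
  cases hmin : xs.foldl fmin none with
  | none =>
    have hall := ((foldl_fmin_none xs none).mp hmin).2
    have hres : xs.foldl pvStepB none = none := by
      cases hres : xs.foldl pvStepB none with
      | none => rfl
      | some p =>
        rw [hres, hmin] at hidx
        simp at hidx
    have hfind : pvFrameworks.find? (fun f => xs.contains f) = none := by
      rw [List.find?_eq_none]
      intro f hf hc
      obtain ⟨j, hjl, hjf⟩ := List.getElem_of_mem hf
      have hr := rank_first j f (by rw [List.getElem?_eq_getElem hjl, hjf])
      have hfx : f ∈ xs := by simpa using hc
      rw [hall f hfx] at hr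
      cases hr
    rw [hfind, hres]
  | some i =>
    obtain ⟨ha, hmin2, _⟩ := foldl_fmin_some xs none i hmin
    rcases ha with h' | ⟨x, hx, hrx⟩
    · cases h'
    have hspec := rank_spec x i hrx
    obtain ⟨hi0, hi20, hget⟩ := hspec
    have hfind : pvFrameworks.find? (fun f => xs.contains f) = some x := by
      rw [List.find?_eq_some_iff_getElem]
      refine ⟨by simpa using hx, i.toNat, ?_, ?_, ?_⟩
      · have : pvFrameworks.length = 20 := by decide
        omega
      · exact Option.some.inj (by rw [← List.getElem?_eq_getElem]; exact hget)
      · intro j hj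
        have h20 : pvFrameworks.length = 20 := by decide
        have hjl : j < pvFrameworks.length := by omega
        by_contra hcj
        have hc : xs.contains (pvFrameworks[j]'hjl) = true := by
          cases hv : xs.contains (pvFrameworks[j]'hjl)
          · exact absurd (by rw [hv]; rfl) hcj
          · rfl
        have hmem : (pvFrameworks[j]'hjl) ∈ xs := by simpa using hc
        have hrj := rank_first j (pvFrameworks[j]'hjl) (List.getElem?_eq_getElem hjl)
        have := hmin2 _ hmem _ hrj
        omega
    cases hres : xs.foldl pvStepB none with
    | none =>
      rw [hres, hmin] at hidx
      simp at hidx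
    | some p =>
      obtain ⟨i', s⟩ := p
      rw [hres, hmin] at hidx
      simp at hidx
      subst hidx
      have hgs := hg i' s hres
      have : s = x := by
        have := hgs.2.2
        rw [hget] at this
        exact (Option.some.inj this).symm
      rw [hfind, this]

-- ===== VERDICT (by name: the statement is the Claim_ definition above) =====
theorem get_sdk_name_spec : Claim_equal_get_sdk_name := by
  intro xs _
  unfold Spec_get_sdk_name
  exact pv_main xs
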